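-- pv_equiv track=rewrite | github.com/h2oai/datatable | .venv/lib/python3.11/site-packages/poetry/core/utils/helpers.py | parse_requires
-- ===== SOURCE A (Python) =====
-- def parse_requires(requires: str) -> list[str]:
--     lines = requires.split("\n")
--
--     requires_dist = []
--     in_section = False
--     current_marker = None
--     for line in lines:
--         line = line.strip()
--         if not line:
--             if in_section:
--                 in_section = False
--
--             continue
--
--         if line.startswith("["):
--             # extras or conditional dependencies
--             marker = line.lstrip("[").rstrip("]")
--             if ":" not in marker:
--                 extra, marker = marker, ""
--             else:
--                 extra, marker = marker.split(":")
--
--             if extra: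
--                 if marker:
--                     marker = f'{marker} and extra == "{extra}"'
--                 else:
--                     marker = f'extra == "{extra}"'
--
--             if marker:
--                 current_marker = marker
--
--             continue
--
--         if current_marker:
--             line = f"{line} ; {current_marker}"
--
--         requires_dist.append(line)
--
--     return requires_dist
-- ===== SOURCE B (Python) =====
-- def _marker_of_header(line):
--     # same extra/marker-splitting logic as the original header parsing
--     marker = line.lstrip("[").rstrip("]")
--     if ":" not in marker:
--         extra, marker = marker, ""
--     else:
--         extra, marker = marker.split(":")
--     if extra:
--         if marker:
--             marker = f'{marker} and extra == "{extra}"'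
--         else:
--             marker = f'extra == "{extra}"'
--     return marker
--
--
-- def parse_requires(requires: str) -> list[str]:
--     # pass 1: partition the non-blank stripped lines into sections keyed by the active marker
--     sections = [("", [])]
--     for raw in requires.split("\n"):
--         line = raw.strip()
--         if not line:
--             continue
--         if line.startswith("["):
--             marker = _marker_of_header(line)
--             if marker:
--                 sections.append((marker, []))
--         else:
--             sections[-1][1].append(line)
--     # pass 2: flatten, tagging each line with its section's marker
--     return [
--         line if not marker else f"{line} ; {marker}"
--         for marker, lines in sections
--         for line in lines
--     ]
-- ===== Notes on version B (the rewrite author's own statement) =====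
-- stated objective: alternative
-- what changed: A's single stateful line loop (result list + current_marker mutated together) is re-decomposed into two passes: pass 1 partitions the non-blank lines into sections keyed by their computed marker (header parsing factored into a helper), pass 2 flattens the sections, tagging each line with its section's marker.
import Mathlib
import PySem

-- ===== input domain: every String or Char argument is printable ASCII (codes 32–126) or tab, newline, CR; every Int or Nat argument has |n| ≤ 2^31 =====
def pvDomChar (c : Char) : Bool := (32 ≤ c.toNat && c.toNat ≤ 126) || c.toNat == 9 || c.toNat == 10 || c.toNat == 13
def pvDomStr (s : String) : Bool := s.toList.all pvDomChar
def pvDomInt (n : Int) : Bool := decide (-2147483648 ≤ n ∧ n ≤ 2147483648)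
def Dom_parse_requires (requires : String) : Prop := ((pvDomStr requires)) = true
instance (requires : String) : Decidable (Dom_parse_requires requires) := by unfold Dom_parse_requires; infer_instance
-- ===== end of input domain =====

-- B re-decomposes A's single stateful loop into two passes (group lines into marker sections, then flatten); return values agree on Pre_ (no multi-colon headers, where both Pythons raise ValueError).

-- ===== PORT A =====
-- literal port of Source A: one fold over the lines carrying (requires_dist, in_section, current_marker).
-- line.lstrip("[") / .rstrip("]") are ported by hand as dropWhile on the char list (exact: both strip
-- the single given character from the respective end); marker.split(":") unpacking is read with getD —
-- Python raises ValueError when it yields more than two parts, and Pre_ excludes exactly those inputs.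
def parse_requires (requires : String) : List String :=
  let lines := (PySem.Str.split? requires "\n").getD []
  let st := lines.foldl
    (fun (st : List String × Bool × Option String) rawLine =>
      let dist := st.1
      let inSection := st.2.1
      let currentMarker := st.2.2
      let line := PySem.Str.strip rawLine
      if line = "" then
        (dist, (if inSection then false else inSection), currentMarker)
      else if PySem.Str.startswith line "[" then
        let marker := String.ofList (((line.toList.dropWhile (· == '[')).reverse.dropWhile (· == ']')).reverse)
        let em :=
          if PySem.Str.isIn ":" marker = false then (marker, "")
          else ((((PySem.Str.split? marker ":").getD [])).getD 0 "", (((PySem.Str.split? marker ":").getD [])).getD 1 "")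
        let extra := em.1
        let marker := em.2
        let marker :=
          if extra ≠ "" then
            if marker ≠ "" then
              String.ofList (marker.toList ++ (" and extra == \"").toList ++ extra.toList ++ ("\"").toList)
            else
              String.ofList (("extra == \"").toList ++ extra.toList ++ ("\"").toList)
          else marker
        let currentMarker := if marker ≠ "" then some marker else currentMarker
        (dist, inSection, currentMarker)
      else
        let line :=
          match currentMarker with
          | some m => if m ≠ "" then String.ofList (line.toList ++ (" ; ").toList ++ m.toList) else line
          | none => line
        (dist ++ [line], inSection, currentMarker))
    ([], false, none)
  st.1

-- ===== PORT B =====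
-- port of Source B's helper _marker_of_header (same hand-ported lstrip/rstrip/split-unpack as in A's port)
def pvMarkerOfHeader (line : String) : String :=
  let marker := String.ofList (((line.toList.dropWhile (· == '[')).reverse.dropWhile (· == ']')).reverse)
  let em :=
    if PySem.Str.isIn ":" marker = false then (marker, "")
    else ((((PySem.Str.split? marker ":").getD [])).getD 0 "", (((PySem.Str.split? marker ":").getD [])).getD 1 "")
  let extra := em.1
  let marker := em.2
  if extra ≠ "" then
    if marker ≠ "" then
      String.ofList (marker.toList ++ (" and extra == \"").toList ++ extra.toList ++ ("\"").toList)
    else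
      String.ofList (("extra == \"").toList ++ extra.toList ++ ("\"").toList)
  else marker

-- Source B's sections[-1][1].append(line): append a line to the last section
def pvAppendLast (secs : List (String × List String)) (line : String) : List (String × List String) :=
  match secs with
  | [] => []
  | [s] => [(s.1, s.2 ++ [line])]
  | s :: rest => s :: pvAppendLast rest line

def parse_requires_alt (requires : String) : List String :=
  let sections := ((PySem.Str.split? requires "\n").getD []).foldl
    (fun (secs : List (String × List String)) raw =>
      let line := PySem.Str.strip raw
      if line = "" then secs
      else if PySem.Str.startswith line "[" then
        let marker := pvMarkerOfHeader line
        if marker ≠ "" then secs ++ [(marker, [])] else secs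
      else pvAppendLast secs line)
    [("", [])]
  sections.flatMap (fun sec =>
    sec.2.map (fun line =>
      if sec.1 = "" then line
      else String.ofList (line.toList ++ (" ; ").toList ++ sec.1.toList)))

-- ===== PRECONDITION & SPEC =====
-- Pre_ excludes inputs with a section header whose bracket-stripped text contains two or more colons:
-- there the split of the marker yields more than two values to unpack and BOTH Pythons raise ValueError.
def Pre_parse_requires (requires : String) : Prop :=
  ∀ l ∈ (PySem.Str.split? requires "\n").getD [],
    PySem.Str.startswith (PySem.Str.strip l) "[" = true →
      PySem.Str.count (String.ofList ((((PySem.Str.strip l).toList.dropWhile (· == '[')).reverse.dropWhile (· == ']')).reverse)) ":" ≤ 1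
instance (requires : String) : Decidable (Pre_parse_requires requires) := by unfold Pre_parse_requires; infer_instance

def pvWitness_parse_requires : String := "foo\n[dev]\nbar\n\n[x:sys]\nbaz"

def Spec_parse_requires (requires : String) (out : List String) : Prop := out = parse_requires_alt requires
instance (requires : String) (out : List String) : Decidable (Spec_parse_requires requires out) := by unfold Spec_parse_requires; infer_instance

-- ===== CLAIM (what is proved, stated in full; the proofs are below) =====
def Claim_equal_parse_requires : Prop := ∀ (requires : String), Dom_parse_requires requires → Pre_parse_requires requires → Spec_parse_requires requires (parse_requires requires)

-- ===== LEMMAS AND PROOFS =====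


-- proof-side names for the two loop bodies and the shared tagging/flattening
def pvStepA (st : List String × Bool × Option String) (rawLine : String) :
    List String × Bool × Option String :=
  let dist := st.1
  let inSection := st.2.1
  let currentMarker := st.2.2
  let line := PySem.Str.strip rawLine
  if line = "" then
    (dist, (if inSection then false else inSection), currentMarker)
  else if PySem.Str.startswith line "[" then
    let marker := pvMarkerOfHeader line
    let currentMarker := if marker ≠ "" then some marker else currentMarker
    (dist, inSection, currentMarker)
  else
    let line :=
      match currentMarker with
      | some m => if m ≠ "" then String.ofList (line.toList ++ (" ; ").toList ++ m.toList) else line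
      | none => line
    (dist ++ [line], inSection, currentMarker)

def pvStepB (secs : List (String × List String)) (raw : String) : List (String × List String) :=
  let line := PySem.Str.strip raw
  if line = "" then secs
  else if PySem.Str.startswith line "[" then
    let marker := pvMarkerOfHeader line
    if marker ≠ "" then secs ++ [(marker, [])] else secs
  else pvAppendLast secs line

def pvTag (m line : String) : String :=
  if m = "" then line else String.ofList (line.toList ++ (" ; ").toList ++ m.toList)

def pvFlatten (secs : List (String × List String)) : List String :=
  secs.flatMap (fun sec => sec.2.map (pvTag sec.1))

def pvOptM : Option String → String
  | none => ""
  | some m => m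

theorem pvParseA_eq (requires : String) :
    parse_requires requires =
      ((((PySem.Str.split? requires "\n").getD []).foldl pvStepA ([], false, none)).1) := rfl

theorem pvParseB_eq (requires : String) :
    parse_requires_alt requires =
      pvFlatten (((PySem.Str.split? requires "\n").getD []).foldl pvStepB [("", [])]) := rfl

theorem pvAppendLast_ne_nil (secs : List (String × List String)) (line : String)
    (h : secs ≠ []) : pvAppendLast secs line ≠ [] := by
  cases secs with
  | nil => exact absurd rfl h
  | cons s rest =>
    cases rest with
    | nil => simp [pvAppendLast]
    | cons t ts => simp [pvAppendLast]

theorem pvGetLast_appendLast (secs : List (String × List String)) (line : String)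
    (h : secs ≠ []) (h' : pvAppendLast secs line ≠ []) :
    (pvAppendLast secs line).getLast h' =
      ((secs.getLast h).1, (secs.getLast h).2 ++ [line]) := by
  induction secs with
  | nil => exact absurd rfl h
  | cons s rest ih =>
    cases rest with
    | nil => simp [pvAppendLast]
    | cons t ts =>
      have hrest : (t :: ts : List (String × List String)) ≠ [] := by simp
      have h'' : pvAppendLast (t :: ts) line ≠ [] := pvAppendLast_ne_nil _ _ hrest
      simp only [pvAppendLast, List.getLast_cons h'', List.getLast_cons hrest]
      exact ih hrest h''

theorem pvFlatten_cons (s : String × List String) (rest : List (String × List String)) :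
    pvFlatten (s :: rest) = s.2.map (pvTag s.1) ++ pvFlatten rest := by
  simp [pvFlatten]

theorem pvFlatten_appendLast (secs : List (String × List String)) (line : String)
    (h : secs ≠ []) :
    pvFlatten (pvAppendLast secs line) =
      pvFlatten secs ++ [pvTag (secs.getLast h).1 line] := by
  induction secs with
  | nil => exact absurd rfl h
  | cons s rest ih =>
    cases rest with
    | nil => simp [pvAppendLast, pvFlatten]
    | cons t ts =>
      have hrest : (t :: ts : List (String × List String)) ≠ [] := by simp
      show pvFlatten (s :: pvAppendLast (t :: ts) line) = _
      rw [pvFlatten_cons, pvFlatten_cons, ih hrest, List.getLast_cons hrest]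
      simp [List.append_assoc]

theorem pvKey (ls : List String) (dist : List String) (insec : Bool) (cm : Option String)
    (secs : List (String × List String)) (h1 : secs ≠ [])
    (h2 : (secs.getLast h1).1 = pvOptM cm)
    (h3 : pvFlatten secs = dist) :
    (ls.foldl pvStepA (dist, insec, cm)).1 = pvFlatten (ls.foldl pvStepB secs) := by
  induction ls generalizing dist insec cm secs with
  | nil => simpa using h3.symm
  | cons l ls ih =>
    simp only [List.foldl_cons]
    by_cases hblank : PySem.Str.strip l = ""
    · rw [show pvStepA (dist, insec, cm) l = (dist, (if insec then false else insec), cm) by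
        simp [pvStepA, hblank]]
      rw [show pvStepB secs l = secs by simp [pvStepB, hblank]]
      exact ih dist _ cm secs h1 h2 h3
    · by_cases hhdr : PySem.Chars.startswith (PySem.Chars.strip l.toList) ['['] = true
      · by_cases hm : pvMarkerOfHeader (PySem.Str.strip l) = ""
        · rw [show pvStepA (dist, insec, cm) l = (dist, insec, cm) by
            simp [pvStepA, hblank, hhdr, hm]]
          rw [show pvStepB secs l = secs by simp [pvStepB, hblank, hhdr, hm]]
          exact ih dist insec cm secs h1 h2 h3
        · rw [show pvStepA (dist, insec, cm) l =
              (dist, insec, some (pvMarkerOfHeader (PySem.Str.strip l))) by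
            simp [pvStepA, hblank, hhdr, hm]]
          rw [show pvStepB secs l = secs ++ [(pvMarkerOfHeader (PySem.Str.strip l), [])] by
            simp [pvStepB, hblank, hhdr, hm]]
          refine ih dist insec _ _ (by simp) ?_ ?_
          · simp [pvOptM]
          · simpa [pvFlatten] using h3
      · have hhdr' : PySem.Chars.startswith (PySem.Chars.strip l.toList) ['['] = false := by
          simpa using hhdr
        have hA : pvStepA (dist, insec, cm) l =
            (dist ++ [pvTag (pvOptM cm) (PySem.Str.strip l)], insec, cm) := by
          cases cm with
          | none => simp [pvStepA, hblank, hhdr', pvTag, pvOptM]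
          | some m =>
            by_cases hm : m = ""
            · simp [pvStepA, hblank, hhdr', pvTag, pvOptM, hm]
            · simp [pvStepA, hblank, hhdr', pvTag, pvOptM, hm]
        rw [hA]
        rw [show pvStepB secs l = pvAppendLast secs (PySem.Str.strip l) by
          simp [pvStepB, hblank, hhdr']]
        have h1' := pvAppendLast_ne_nil secs (PySem.Str.strip l) h1
        refine ih _ insec cm _ h1' ?_ ?_
        · rw [pvGetLast_appendLast secs _ h1 h1']
          exact h2
        · rw [pvFlatten_appendLast secs _ h1, h3, h2]

-- ===== VERDICT =====
theorem parse_requires_spec : Claim_equal_parse_requires := by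
  intro requires _ _
  unfold Spec_parse_requires
  rw [pvParseA_eq, pvParseB_eq]
  exact pvKey _ [] false none [("", [])] (by simp) (by simp [pvOptM]) (by simp [pvFlatten])
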